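-- pv_equiv track=rewrite | github.com/dougallj/applegpu | genhtml.py | trim_indentation
-- ===== SOURCE A (Python) =====
-- def trim_indentation(s):
-- 	s = s.replace('\t', '  ')
-- 	lines = s.split('\n')
-- 	indents = []
-- 	for line in lines:
-- 		if not line.strip():
-- 			continue
-- 		indents.append(len(line) - len(line.lstrip(' ')))
-- 	m = min(indents) if indents else 0
-- 	while lines and not lines[0].strip():
-- 		lines.pop(0)
-- 	while lines and not lines[-1].strip():
-- 		lines.pop()
-- 	return '\n'.join(i[m:] for i in lines)
-- ===== SOURCE B (Python) =====
-- def trim_indentation(s):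
--     lines = s.replace('\t', '  ').split('\n')
--     first = last = min_indent = None
--     for i, line in enumerate(lines):
--         if line.strip():
--             if first is None:
--                 first = i
--             last = i
--             ind = len(line) - len(line.lstrip(' '))
--             if min_indent is None or ind < min_indent:
--                 min_indent = ind
--     if first is None:
--         return ''
--     return '\n'.join(line[min_indent:] for line in lines[first:last + 1])
-- ===== Notes on version B (the rewrite author's own statement) =====
-- stated objective: simpler
-- what changed: Replaces A's three separate passes (an indent-collecting loop plus two destructive edge-trimming while-loops with pops) by one enumerate loop that tracks first/last non-blank indices and the running minimum indent, then emits one slice.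
import Mathlib
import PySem

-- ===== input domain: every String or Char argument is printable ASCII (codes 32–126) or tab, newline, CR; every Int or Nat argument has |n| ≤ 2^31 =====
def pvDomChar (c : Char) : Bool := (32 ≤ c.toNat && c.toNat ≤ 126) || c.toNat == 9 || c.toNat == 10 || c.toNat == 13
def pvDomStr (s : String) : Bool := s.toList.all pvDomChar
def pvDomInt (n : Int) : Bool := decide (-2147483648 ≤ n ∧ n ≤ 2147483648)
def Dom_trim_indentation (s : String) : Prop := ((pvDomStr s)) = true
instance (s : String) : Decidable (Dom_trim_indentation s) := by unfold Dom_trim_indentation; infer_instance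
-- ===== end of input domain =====

-- B fuses A's three separate passes (indent scan + two edge-trimming while-loops) into one enumerate loop; objective: simpler.

-- ===== PORT A =====
-- line.lstrip(' ') — hand port, exact: removes leading ' ' characters only
def pvLstripSp (line : String) : String := String.ofList (line.toList.dropWhile (· == ' '))

-- `not line.strip()`
def pvBlank (line : String) : Bool := PySem.Str.strip line == ""

-- len(line) - len(line.lstrip(' '))
def pvInd (line : String) : Int := PySem.Str.len line - PySem.Str.len (pvLstripSp line)

-- `while lines and not lines[0].strip(): lines.pop(0)`
def pvPopFront : List String → List String
  | [] => []
  | l :: rest => if pvBlank l then pvPopFront rest else l :: rest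

-- `while lines and not lines[-1].strip(): lines.pop()` — exact: pops trailing blank lines
def pvPopBack (ls : List String) : List String := (pvPopFront ls.reverse).reverse

-- `min(indents) if indents else 0`
def pvMinOr0 (indents : List Int) : Int :=
  match PySem.List.min? indents (fun y => y) with
  | some v => v
  | none => 0

def trim_indentation (s : String) : String :=
  let s2 := PySem.Str.replace s "\t" "  "
  let lines := (PySem.Str.split? s2 "\n").getD []
  let indents := lines.foldl (fun acc line => if pvBlank line then acc else acc ++ [pvInd line]) ([] : List Int)
  let m : Int := pvMinOr0 indents
  let lines2 := pvPopBack (pvPopFront lines)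
  PySem.Str.join "\n" (lines2.map (fun i => PySem.Str.slice i (some m) none))

-- ===== PORT B =====
-- one iteration of B's enumerate loop over the state (first, last, min_indent)
def pvStep (st : Option Int × Option Int × Option Int) (p : Int × String) :
    Option Int × Option Int × Option Int :=
  if pvBlank p.2 then st
  else
    ((match st.1 with | none => some p.1 | some j => some j),
     some p.1,
     (match st.2.2 with
      | none => some (pvInd p.2)
      | some m => some (if pvInd p.2 < m then pvInd p.2 else m)))

-- B's final `if first is None: return ''` / sliced join
def pvEmit (lines : List String) (st : Option Int × Option Int × Option Int) : String :=
  match st with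
  | (some f, some la, some mi) =>
      PySem.Str.join "\n" ((PySem.List.slice lines (some f) (some (la + 1))).map
        (fun line => PySem.Str.slice line (some mi) none))
  | _ => ""

def trim_indentation_alt (s : String) : String :=
  let lines := (PySem.Str.split? (PySem.Str.replace s "\t" "  ") "\n").getD []
  pvEmit lines ((PySem.List.enumerate lines 0).foldl pvStep (none, none, none))

-- ===== PRECONDITION & SPEC =====
def Spec_trim_indentation (s : String) (out : String) : Prop := out = trim_indentation_alt s
instance (s : String) (out : String) : Decidable (Spec_trim_indentation s out) := by unfold Spec_trim_indentation; infer_instance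

-- ===== CLAIM (what is proved, stated in full; the proofs are below) =====
def Claim_equal_trim_indentation : Prop := ∀ (s : String), Dom_trim_indentation s → Spec_trim_indentation s (trim_indentation s)

-- ===== LEMMAS AND PROOFS =====

theorem pvPopFront_eq (ls : List String) : pvPopFront ls = ls.dropWhile pvBlank := by
  induction ls with
  | nil => rfl
  | cons l rest ih => by_cases h : pvBlank l <;> simp [pvPopFront, h, ih]

theorem pvPopBack_eq (ls : List String) : pvPopBack ls = ls.rdropWhile pvBlank := by
  simp [pvPopBack, pvPopFront_eq, List.rdropWhile]

theorem pvIndents_eq (ls : List String) :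
    ls.foldl (fun acc line => if pvBlank line then acc else acc ++ [pvInd line]) ([] : List Int)
      = (ls.filter (fun l => !pvBlank l)).map pvInd := by
  have hfun : (fun (acc : List Int) line => if pvBlank line then acc else acc ++ [pvInd line])
      = (fun acc line => if !pvBlank line then acc ++ [pvInd line] else acc) := by
    funext acc line; by_cases h : pvBlank line <;> simp [h]
  rw [hfun, PySem.List.foldl_append_if]
  simp

def pvRunMin (st : Option Int) (z : Int) : Option Int :=
  match st with
  | none => some z
  | some m => some (if z < m then z else m)

theorem pvRunMin_foldl (a : Int) (t : List Int) :
    t.foldl pvRunMin (some a) = some (t.foldl min a) := by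
  induction t generalizing a with
  | nil => rfl
  | cons z zs ih =>
      have h1 : pvRunMin (some a) z = some (min a z) := by
        simp only [pvRunMin]
        rcases lt_or_ge z a with hlt | hge
        · rw [if_pos hlt, min_eq_right (le_of_lt hlt)]
        · rw [if_neg (not_lt.2 hge), min_eq_left hge]
      rw [List.foldl_cons, h1, ih, List.foldl_cons]

theorem pvStep_eq (st : Option Int × Option Int × Option Int) (q : Int × String) :
    pvStep st q = if pvBlank q.2 then st
      else ((match st.1 with | none => some q.1 | some j => some j), some q.1,
            pvRunMin st.2.2 (pvInd q.2)) := by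
  rcases st with ⟨f, la, mi⟩
  cases mi <;> rfl

theorem pvAllOf (ls : List String) (h : ls.filter (fun l => !pvBlank l) = []) :
    ∀ l ∈ ls, pvBlank l = true := by
  intro l hl
  have := List.filter_eq_nil_iff.1 h l hl
  simpa using this

theorem pvNilOf (ls : List String) (h : ∀ l ∈ ls, pvBlank l = true) :
    ls.filter (fun l => !pvBlank l) = [] :=
  List.filter_eq_nil_iff.2 (fun a ha => by simp [h a ha])

theorem pvTakeWhileApp (ls : List String) (x : String)
    (hall : ls.filter (fun l => !pvBlank l) ≠ []) :
    (ls ++ [x]).takeWhile pvBlank = ls.takeWhile pvBlank := by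
  rw [List.takeWhile_append, if_neg]
  intro hlen
  exact hall (pvNilOf _ (List.takeWhile_eq_self_iff.1
    ((List.takeWhile_prefix pvBlank).eq_of_length hlen)))

theorem pvStep_spec (ls : List String) :
    (PySem.List.enumerate ls 0).foldl pvStep (none, none, none) =
      if ls.filter (fun l => !pvBlank l) = [] then (none, none, none)
      else (some ((ls.takeWhile pvBlank).length : Int),
            some (((ls.rdropWhile pvBlank).length : Int) - 1),
            ((ls.filter (fun l => !pvBlank l)).map pvInd).foldl pvRunMin none) := by
  induction ls using List.reverseRecOn with
  | nil => simp
  | append_singleton ls x ih =>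
    rw [PySem.List.enumerate_append, List.foldl_append, ih]
    have henum : PySem.List.enumerate [x] (0 + (ls.length : Int)) = [(0 + (ls.length : Int), x)] := by
      simp [PySem.List.enumerate_cons, PySem.List.enumerate_nil]
    rw [henum, List.foldl_cons, List.foldl_nil]
    by_cases hx : pvBlank x
    · by_cases hall : ls.filter (fun l => !pvBlank l) = []
      · rw [if_pos hall, pvStep_eq, if_pos hx]
        have hnil : (ls ++ [x]).filter (fun l => !pvBlank l) = [] := by
          simp [List.filter_append, hall, hx]
        rw [if_pos hnil]
      · have h2 : (ls ++ [x]).filter (fun l => !pvBlank l) = ls.filter (fun l => !pvBlank l) := by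
          simp [List.filter_append, hx]
        rw [if_neg hall, pvStep_eq, if_pos hx, h2, if_neg hall,
            List.rdropWhile_concat_pos _ _ _ hx, pvTakeWhileApp ls x hall]
    · have hxb : ¬ pvBlank x = true := by simp [hx]
      have hflt : (ls ++ [x]).filter (fun l => !pvBlank l) = ls.filter (fun l => !pvBlank l) ++ [x] := by
        simp [List.filter_append, hx]
      have hne : (ls ++ [x]).filter (fun l => !pvBlank l) ≠ [] := by simp [hflt]
      rw [pvStep_eq, if_neg hxb, if_neg hne, List.rdropWhile_concat_neg _ _ _ hxb, hflt]
      by_cases hall : ls.filter (fun l => !pvBlank l) = []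
      · rw [if_pos hall, hall]
        have hself : ls.takeWhile pvBlank = ls :=
          List.takeWhile_eq_self_iff.2 (pvAllOf ls hall)
        have htw : (ls ++ [x]).takeWhile pvBlank = ls := by
          rw [List.takeWhile_append, if_pos (by rw [hself])]
          simp [hx]
        rw [htw]
        refine Prod.ext ?_ (Prod.ext ?_ ?_)
        · simp
        · simp [List.length_append]
        · simp [pvRunMin]
      · rw [if_neg hall, pvTakeWhileApp ls x hall]
        refine Prod.ext ?_ (Prod.ext ?_ ?_)
        · rfl
        · simp [List.length_append]
        · simp [List.map_append, List.foldl_append]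

theorem pvRdropAppendAll (a w : List String) (hw : ∀ x ∈ w, pvBlank x = true) :
    List.rdropWhile pvBlank (a ++ w) = List.rdropWhile pvBlank a := by
  induction w using List.reverseRecOn with
  | nil => simp
  | append_singleton w x ih =>
      rw [← List.append_assoc, List.rdropWhile_concat_pos _ _ _ (hw x (by simp))]
      exact ih (fun y hy => hw y (by simp [hy]))

theorem pvFltLt (ls : List String) (h : ls.filter (fun l => !pvBlank l) ≠ []) :
    (ls.takeWhile pvBlank).length < (ls.rdropWhile pvBlank).length := by
  have hrdne : ls.rdropWhile pvBlank ≠ [] := by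
    intro h0
    exact h (pvNilOf ls (List.rdropWhile_eq_nil_iff.1 h0))
  by_contra hle
  rw [not_lt] at hle
  have hrdtake : ls.rdropWhile pvBlank = ls.take (ls.rdropWhile pvBlank).length :=
    List.prefix_iff_eq_take.1 (List.rdropWhile_prefix _ _)
  have htwtake : ls.takeWhile pvBlank = ls.take (ls.takeWhile pvBlank).length :=
    List.prefix_iff_eq_take.1 (List.takeWhile_prefix _)
  have hsub : ls.rdropWhile pvBlank ⊆ ls.takeWhile pvBlank := by
    intro a ha
    rw [hrdtake] at ha
    have hmin : ls.take (ls.rdropWhile pvBlank).length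
        = List.take (ls.rdropWhile pvBlank).length (ls.take (ls.takeWhile pvBlank).length) := by
      rw [List.take_take, min_eq_left hle]
    rw [hmin, ← htwtake] at ha
    exact List.take_subset _ _ ha
  exact List.rdropWhile_last_not pvBlank ls hrdne
    (List.mem_takeWhile_imp (hsub (List.getLast_mem hrdne)))

theorem pvDropWhile_eq_drop (p : String → Bool) (l : List String) :
    l.dropWhile p = l.drop (l.takeWhile p).length := by
  induction l with
  | nil => rfl
  | cons a t ih => by_cases h : p a <;> simp [h, ih]

theorem pvTrimmed_eq (ls : List String) (h : ls.filter (fun l => !pvBlank l) ≠ []) :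
    List.rdropWhile pvBlank (ls.dropWhile pvBlank)
      = PySem.List.slice ls (some ((ls.takeWhile pvBlank).length : Int))
          (some ((((ls.rdropWhile pvBlank).length : Int) - 1) + 1)) := by
  set f := (ls.takeWhile pvBlank).length with hf
  set rd := ls.rdropWhile pvBlank with hrd
  set w := ls.rtakeWhile pvBlank with hwdef
  have hL : (some (((rd.length : Int)) - 1 + 1) : Option Int) = some ((rd.length : Int)) := by
    norm_num
  rw [hL, PySem.List.slice_natCast]
  have hflt : f < rd.length := pvFltLt ls h
  have hdw : ls.dropWhile pvBlank = ls.drop f := by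
    rw [pvDropWhile_eq_drop, hf]
  have hsplit : rd ++ w = ls := List.rdropWhile_append_rtakeWhile
  have hdropls : ls.drop f = rd.drop f ++ w := by
    rw [← hsplit, List.drop_append_of_le_length (le_of_lt hflt)]
  have hw : ∀ x ∈ w, pvBlank x = true := fun x hx => List.mem_rtakeWhile_imp hx
  have hne : rd.drop f ≠ [] := by
    intro hnil
    have hlen := congrArg List.length hnil
    rw [List.length_drop] at hlen
    simp at hlen
    omega
  have hrdne : rd ≠ [] := by
    intro h0
    rw [h0] at hflt
    simp at hflt
  have hself : List.rdropWhile pvBlank (rd.drop f) = rd.drop f := by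
    rw [List.rdropWhile_eq_self_iff]
    intro hl
    rw [List.getLast_drop]
    exact List.rdropWhile_last_not pvBlank ls hrdne
  rw [hdw, hdropls, pvRdropAppendAll _ _ hw, hself,
      List.take_left' (by rw [List.length_drop])]

theorem pvCore (ls : List String) :
    PySem.Str.join "\n" ((pvPopBack (pvPopFront ls)).map (fun i =>
        PySem.Str.slice i (some (pvMinOr0
          (ls.foldl (fun acc line => if pvBlank line then acc else acc ++ [pvInd line]) ([] : List Int)))) none))
      = pvEmit ls ((PySem.List.enumerate ls 0).foldl pvStep (none, none, none)) := by
  rw [pvStep_spec, pvPopFront_eq, pvPopBack_eq, pvIndents_eq]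
  by_cases h : ls.filter (fun l => !pvBlank l) = []
  · rw [if_pos h]
    have hnil : ls.dropWhile pvBlank = [] := List.dropWhile_eq_nil_iff.2 (pvAllOf ls h)
    rw [hnil]
    simp [pvEmit]
    rfl
  · rw [if_neg h]
    obtain ⟨z, zs, hz⟩ := List.exists_cons_of_ne_nil h
    rw [pvTrimmed_eq ls h, hz]
    simp only [List.map_cons, List.foldl_cons]
    have h0 : pvRunMin none (pvInd z) = some (pvInd z) := rfl
    rw [h0, pvRunMin_foldl]
    simp only [pvEmit, pvMinOr0, PySem.List.min?_id_cons]

-- ===== VERDICT (by name: the statement is the Claim_ definition above) =====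
theorem trim_indentation_spec : Claim_equal_trim_indentation := by
  intro s _
  show trim_indentation s = trim_indentation_alt s
  unfold trim_indentation trim_indentation_alt
  exact pvCore _
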